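-- pv_equiv track=rewrite | github.com/Jibbern/Aktie-modellering | pbi_xbrl/excel_writer_drivers.py | driver_source_display
-- ===== SOURCE A (Python) =====
-- from typing import TYPE_CHECKING, Any, Callable, Dict, List, Optional, Set, Tuple
--
-- def driver_source_display(source_type: Any, source_doc: Any = "") -> str:
--     low = " ".join([str(source_type or ""), str(source_doc or "")]).lower()
--     if "internal_metric" in low or "history_q" in low or "adjusted_metrics" in low:
--         return "internal_metric"
--     if any(tok in low for tok in ("earnings_presentation", "presentation", "slides_text", "slides_ocr", "slides")):
--         return "presentation"
--     if any(tok in low for tok in ("earnings_release", "press_release", "press release", "release")):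
--         return "earnings_release"
--     if "transcript" in low:
--         return "transcript"
--     if any(tok in low for tok in ("10-q", "10q")):
--         return "10-Q"
--     if any(tok in low for tok in ("10-k", "10k")):
--         return "10-K"
--     return str(source_type or "") or "text"
-- ===== SOURCE B (Python) =====
-- # Single left-to-right scan over `low`: at each position, try token prefixes and
-- # keep the minimal-priority match; redundant tokens of A (substrings of others,
-- # e.g. "earnings_presentation" always contains "presentation") are dropped.
-- _SCAN = [
--     ("internal_metric", 0), ("history_q", 0), ("adjusted_metrics", 0),
--     ("presentation", 1), ("slides", 1),
--     ("release", 2),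
--     ("transcript", 3),
--     ("10-q", 4), ("10q", 4),
--     ("10-k", 5), ("10k", 5),
-- ]
-- _LABELS = ("internal_metric", "presentation", "earnings_release",
--            "transcript", "10-Q", "10-K")
--
-- def driver_source_display(source_type, source_doc=""):
--     low = " ".join([str(source_type or ""), str(source_doc or "")]).lower()
--     best = len(_LABELS)
--     for i in range(len(low)):
--         for tok, prio in _SCAN:
--             if prio < best and low.startswith(tok, i):
--                 best = prio
--     if best < len(_LABELS):
--         return _LABELS[best]
--     return str(source_type or "") or "text"
-- ===== Notes on version B (the rewrite author's own statement) =====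
-- stated objective: alternative
-- what changed: Instead of six sequential whole-string substring searches, B makes a single left-to-right scan of low, testing a deduplicated token table by prefix at each position and keeping the minimal-priority match in an accumulator; redundant tokens of A (those containing another token of the same branch, e.g. 'earnings_presentation' ⊇ 'presentation') are dropped.
import Mathlib
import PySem

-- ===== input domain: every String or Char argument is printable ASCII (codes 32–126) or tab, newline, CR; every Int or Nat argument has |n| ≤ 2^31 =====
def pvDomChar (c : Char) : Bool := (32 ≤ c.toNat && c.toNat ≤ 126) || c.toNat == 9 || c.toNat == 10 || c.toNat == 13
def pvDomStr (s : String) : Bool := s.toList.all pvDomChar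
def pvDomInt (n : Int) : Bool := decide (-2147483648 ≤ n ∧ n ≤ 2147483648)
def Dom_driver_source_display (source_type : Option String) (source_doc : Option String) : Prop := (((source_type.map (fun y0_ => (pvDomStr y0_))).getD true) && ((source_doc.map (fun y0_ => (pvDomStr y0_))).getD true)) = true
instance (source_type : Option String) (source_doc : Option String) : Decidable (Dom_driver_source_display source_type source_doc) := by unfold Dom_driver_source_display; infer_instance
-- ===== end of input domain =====

-- B replaces A's six-branch substring if-chain by a single left-to-right scan of
-- `low` testing token prefixes at each position and keeping the minimal-priority
-- match (redundant tokens dropped); objective: alternative algorithm, same cost class.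

-- ===== PORT A =====
-- str(x or "") for x : Option String (None and "" are falsy → "")
def pyOrEmpty : Option String → String
  | none => ""
  | some s => if s = "" then "" else s

-- low = " ".join([str(source_type or ""), str(source_doc or "")]).lower()  (same line in both Pythons)
def dsdLow (source_type : Option String) (source_doc : Option String) : String :=
  PySem.Str.lower (PySem.Str.join " " [pyOrEmpty source_type, pyOrEmpty source_doc])

-- the if-chain of A over low; fb = the chain's final 'str(source_type or "") or "text"' value
def dsdChainA (low fb : String) : String :=
  if PySem.Str.isIn "internal_metric" low || PySem.Str.isIn "history_q" low || PySem.Str.isIn "adjusted_metrics" low then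
    "internal_metric"
  else if ["earnings_presentation", "presentation", "slides_text", "slides_ocr", "slides"].any (fun tok => PySem.Str.isIn tok low) then
    "presentation"
  else if ["earnings_release", "press_release", "press release", "release"].any (fun tok => PySem.Str.isIn tok low) then
    "earnings_release"
  else if PySem.Str.isIn "transcript" low then
    "transcript"
  else if ["10-q", "10q"].any (fun tok => PySem.Str.isIn tok low) then
    "10-Q"
  else if ["10-k", "10k"].any (fun tok => PySem.Str.isIn tok low) then
    "10-K"
  else fb

def driver_source_display (source_type : Option String) (source_doc : Option String) : String :=
  dsdChainA (dsdLow source_type source_doc)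
    (if pyOrEmpty source_type = "" then "text" else pyOrEmpty source_type)

-- ===== PORT B =====
-- Source B's _SCAN table, tokens as char lists
def dsdScanTokens : List (List Char × Nat) :=
  [ ("internal_metric".toList, 0), ("history_q".toList, 0), ("adjusted_metrics".toList, 0)
  , ("presentation".toList, 1), ("slides".toList, 1)
  , ("release".toList, 2)
  , ("transcript".toList, 3)
  , ("10-q".toList, 4), ("10q".toList, 4)
  , ("10-k".toList, 5), ("10k".toList, 5) ]

-- Source B's _LABELS
def dsdLabels : List String :=
  ["internal_metric", "presentation", "earnings_release", "transcript", "10-Q", "10-K"]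

-- the body of Source B's inner loop: 'if prio < best and low.startswith(tok, i): best = prio';
-- low.startswith(tok, i) for 0 ≤ i ≤ len(low) is exactly tok.isPrefixOf (cs.drop i) (hand-ported, exact on that range)
def dsdStep (cs : List Char) (i : Nat) (b : Nat) (tp : List Char × Nat) : Nat :=
  if tp.2 < b && List.isPrefixOf tp.1 (cs.drop i) then tp.2 else b

-- the two nested for-loops of Source B, best initialised to len(_LABELS) = 6
def dsdScan (cs : List Char) : Nat :=
  (List.range cs.length).foldl (fun best i => dsdScanTokens.foldl (dsdStep cs i) best) 6

def driver_source_display_alt (source_type : Option String) (source_doc : Option String) : String :=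
  let best := dsdScan (dsdLow source_type source_doc).toList
  if best < 6 then dsdLabels.getD best ""
  else if pyOrEmpty source_type = "" then "text" else pyOrEmpty source_type

-- ===== PRECONDITION & SPEC =====
def Spec_driver_source_display (source_type : Option String) (source_doc : Option String) (out : String) : Prop := out = driver_source_display_alt source_type source_doc
instance (source_type : Option String) (source_doc : Option String) (out : String) : Decidable (Spec_driver_source_display source_type source_doc out) := by unfold Spec_driver_source_display; infer_instance

-- ===== CLAIM (what is proved, stated in full; the proofs are below) =====
def Claim_equal_driver_source_display : Prop := ∀ (source_type : Option String) (source_doc : Option String), Dom_driver_source_display source_type source_doc → Spec_driver_source_display source_type source_doc (driver_source_display source_type source_doc)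

-- ===== LEMMAS AND PROOFS =====

-- all priorities matched anywhere in cs (proof-side view of the scan)
def dsdHits (cs : List Char) : List Nat :=
  (List.range cs.length).flatMap (fun i =>
    dsdScanTokens.filterMap (fun tp =>
      if List.isPrefixOf tp.1 (cs.drop i) then some tp.2 else none))

-- "some token of priority p occurs somewhere in cs"
def dsdOcc (cs : List Char) (p : Nat) : Prop :=
  ∃ tp ∈ dsdScanTokens, tp.2 = p ∧ PySem.Chars.isIn tp.1 cs = true

-- the six grouped occurrence tests of B's (deduplicated) token table
def dsdB0 (cs : List Char) : Bool :=
  PySem.Chars.isIn "internal_metric".toList cs || PySem.Chars.isIn "history_q".toList cs || PySem.Chars.isIn "adjusted_metrics".toList cs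
def dsdB1 (cs : List Char) : Bool :=
  PySem.Chars.isIn "presentation".toList cs || PySem.Chars.isIn "slides".toList cs
def dsdB2 (cs : List Char) : Bool := PySem.Chars.isIn "release".toList cs
def dsdB3 (cs : List Char) : Bool := PySem.Chars.isIn "transcript".toList cs
def dsdB4 (cs : List Char) : Bool :=
  PySem.Chars.isIn "10-q".toList cs || PySem.Chars.isIn "10q".toList cs
def dsdB5 (cs : List Char) : Bool :=
  PySem.Chars.isIn "10-k".toList cs || PySem.Chars.isIn "10k".toList cs

theorem dsd_inner_eq_min (cs : List Char) (i : Nat) (T : List (List Char × Nat)) (b : Nat) :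
    T.foldl (dsdStep cs i) b
      = (T.filterMap (fun tp => if List.isPrefixOf tp.1 (cs.drop i) then some tp.2 else none)).foldl min b := by
  induction T generalizing b with
  | nil => rfl
  | cons tp T ih =>
      by_cases h : List.isPrefixOf tp.1 (cs.drop i) = true
      · have hs : dsdStep cs i b tp = min b tp.2 := by
          unfold dsdStep; rw [h]
          by_cases h2 : tp.2 < b <;> simp [h2] <;> omega
        simp only [List.filterMap_cons, h, reduceIte]
        rw [List.foldl_cons, hs, List.foldl_cons]
        exact ih (min b tp.2)
      · rw [Bool.not_eq_true] at h
        have hs : dsdStep cs i b tp = b := by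
          unfold dsdStep; rw [h]; simp
        simp only [List.filterMap_cons, h, Bool.false_eq_true, reduceIte]
        rw [List.foldl_cons, hs]
        exact ih b

theorem dsd_foldl_flat (g : Nat → List Nat) (L : List Nat) (a : Nat) :
    L.foldl (fun b i => (g i).foldl min b) a = (L.flatMap g).foldl min a := by
  induction L generalizing a with
  | nil => rfl
  | cons i L ih => simp only [List.foldl_cons, List.flatMap_cons, List.foldl_append, ih]

theorem dsd_scan_eq (cs : List Char) : dsdScan cs = (dsdHits cs).foldl min 6 := by
  unfold dsdScan dsdHits
  have h : (fun (best : Nat) i => dsdScanTokens.foldl (dsdStep cs i) best)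
      = (fun (best : Nat) i => ((fun i => dsdScanTokens.filterMap (fun tp => if List.isPrefixOf tp.1 (cs.drop i) then some tp.2 else none)) i).foldl min best) := by
    funext b i; exact dsd_inner_eq_min cs i dsdScanTokens b
  rw [h, dsd_foldl_flat]

theorem dsd_foldl_min_le_init (L : List Nat) : ∀ a : Nat, L.foldl min a ≤ a := by
  induction L with
  | nil => intro a; simp
  | cons x L ih => intro a; exact le_trans (ih (min a x)) (min_le_left _ _)

theorem dsd_foldl_min_le_mem (L : List Nat) : ∀ (a x : Nat), x ∈ L → L.foldl min a ≤ x := by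
  induction L with
  | nil => intro a x hx; simp at hx
  | cons y L ih =>
      intro a x hx
      rcases List.mem_cons.mp hx with h | h
      · subst h
        exact le_trans (dsd_foldl_min_le_init L (min a x)) (min_le_right _ _)
      · exact ih _ _ h

theorem dsd_foldl_min_eq_or_mem (L : List Nat) : ∀ a : Nat, L.foldl min a = a ∨ L.foldl min a ∈ L := by
  induction L with
  | nil => intro a; exact .inl rfl
  | cons y L ih =>
      intro a
      rw [List.foldl_cons]
      rcases ih (min a y) with h | h
      · rcases Nat.le_total a y with h2 | h2
        · exact .inl (by rw [h, Nat.min_eq_left h2])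
        · exact .inr (by rw [h, Nat.min_eq_right h2]; exact List.mem_cons_self)
      · exact .inr (List.mem_cons_of_mem _ h)

theorem dsd_mem_hits (cs : List Char) (p : Nat) :
    p ∈ dsdHits cs ↔ ∃ tp ∈ dsdScanTokens, tp.2 = p ∧ ∃ i < cs.length, List.isPrefixOf tp.1 (cs.drop i) = true := by
  simp only [dsdHits, List.mem_flatMap, List.mem_filterMap, List.mem_range,
    Option.ite_none_right_eq_some, Option.some.injEq]
  constructor
  · rintro ⟨i, hi, tp, htp, hpre, hp⟩
    exact ⟨tp, htp, hp, i, hi, hpre⟩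
  · rintro ⟨tp, htp, hp, i, hi, hpre⟩
    exact ⟨i, hi, tp, htp, hpre, hp⟩

theorem dsd_tokens_ne_nil : ∀ tp ∈ dsdScanTokens, tp.1 ≠ [] := by decide

-- for nonempty tok: bounded-position prefix match ↔ isIn
theorem dsd_occ_pos_iff (cs tok : List Char) (hne : tok ≠ []) :
    (∃ i < cs.length, tok <+: cs.drop i) ↔ PySem.Chars.isIn tok cs = true := by
  rw [← PySem.Chars.exists_prefix_drop_iff_isIn]
  constructor
  · rintro ⟨i, _, h⟩; exact ⟨i, h⟩
  · rintro ⟨j, h⟩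
    refine ⟨j, ?_, h⟩
    by_contra hj
    rw [List.drop_eq_nil_of_le (Nat.le_of_not_lt hj)] at h
    exact hne (List.prefix_nil.mp h)

theorem dsd_mem_hits_occ (cs : List Char) (p : Nat) : p ∈ dsdHits cs ↔ dsdOcc cs p := by
  rw [dsd_mem_hits]
  unfold dsdOcc
  constructor
  · rintro ⟨tp, htp, hp, i, hi, hpre⟩
    exact ⟨tp, htp, hp, (dsd_occ_pos_iff cs tp.1 (dsd_tokens_ne_nil tp htp)).mp
      ⟨i, hi, List.isPrefixOf_iff_prefix.mp hpre⟩⟩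
  · rintro ⟨tp, htp, hp, hin⟩
    obtain ⟨i, hi, hpre⟩ := (dsd_occ_pos_iff cs tp.1 (dsd_tokens_ne_nil tp htp)).mpr hin
    exact ⟨tp, htp, hp, i, hi, List.isPrefixOf_iff_prefix.mpr hpre⟩

theorem dsd_scan_le_six (cs : List Char) : dsdScan cs ≤ 6 := by
  rw [dsd_scan_eq]; exact dsd_foldl_min_le_init _ _

theorem dsd_scan_le_of_occ (cs : List Char) (p : Nat) (h : dsdOcc cs p) : dsdScan cs ≤ p := by
  rw [dsd_scan_eq]
  exact dsd_foldl_min_le_mem _ _ _ ((dsd_mem_hits_occ cs p).mpr h)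

theorem dsd_scan_cases (cs : List Char) : dsdScan cs = 6 ∨ dsdOcc cs (dsdScan cs) := by
  rw [dsd_scan_eq]
  rcases dsd_foldl_min_eq_or_mem (dsdHits cs) 6 with h | h
  · exact .inl h
  · exact .inr ((dsd_mem_hits_occ cs _).mp h)

theorem dsd_occ0 (cs : List Char) : dsdOcc cs 0 ↔ dsdB0 cs = true := by
  simp [dsdOcc, dsdScanTokens, dsdB0, or_assoc]
theorem dsd_occ1 (cs : List Char) : dsdOcc cs 1 ↔ dsdB1 cs = true := by
  simp [dsdOcc, dsdScanTokens, dsdB1]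
theorem dsd_occ2 (cs : List Char) : dsdOcc cs 2 ↔ dsdB2 cs = true := by
  simp [dsdOcc, dsdScanTokens, dsdB2]
theorem dsd_occ3 (cs : List Char) : dsdOcc cs 3 ↔ dsdB3 cs = true := by
  simp [dsdOcc, dsdScanTokens, dsdB3]
theorem dsd_occ4 (cs : List Char) : dsdOcc cs 4 ↔ dsdB4 cs = true := by
  simp [dsdOcc, dsdScanTokens, dsdB4]
theorem dsd_occ5 (cs : List Char) : dsdOcc cs 5 ↔ dsdB5 cs = true := by
  simp [dsdOcc, dsdScanTokens, dsdB5]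

-- scan result = the chain index over B's grouped tests
theorem dsd_scan_eq_idx (cs : List Char) :
    dsdScan cs = (if dsdB0 cs then 0 else if dsdB1 cs then 1 else if dsdB2 cs then 2
      else if dsdB3 cs then 3 else if dsdB4 cs then 4 else if dsdB5 cs then 5 else 6) := by
  have h6 := dsd_scan_le_six cs
  have hcases := dsd_scan_cases cs
  by_cases h0 : dsdB0 cs = true
  · rw [if_pos h0]
    have := dsd_scan_le_of_occ cs 0 ((dsd_occ0 cs).mpr h0)
    omega
  rw [if_neg h0]
  have n0 : dsdScan cs ≠ 0 := fun e => h0 ((dsd_occ0 cs).mp (by rcases hcases with h | h; omega; exact e ▸ h))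
  by_cases h1 : dsdB1 cs = true
  · rw [if_pos h1]
    have := dsd_scan_le_of_occ cs 1 ((dsd_occ1 cs).mpr h1)
    omega
  rw [if_neg h1]
  have n1 : dsdScan cs ≠ 1 := fun e => h1 ((dsd_occ1 cs).mp (by rcases hcases with h | h; omega; exact e ▸ h))
  by_cases h2 : dsdB2 cs = true
  · rw [if_pos h2]
    have := dsd_scan_le_of_occ cs 2 ((dsd_occ2 cs).mpr h2)
    omega
  rw [if_neg h2]
  have n2 : dsdScan cs ≠ 2 := fun e => h2 ((dsd_occ2 cs).mp (by rcases hcases with h | h; omega; exact e ▸ h))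
  by_cases h3 : dsdB3 cs = true
  · rw [if_pos h3]
    have := dsd_scan_le_of_occ cs 3 ((dsd_occ3 cs).mpr h3)
    omega
  rw [if_neg h3]
  have n3 : dsdScan cs ≠ 3 := fun e => h3 ((dsd_occ3 cs).mp (by rcases hcases with h | h; omega; exact e ▸ h))
  by_cases h4 : dsdB4 cs = true
  · rw [if_pos h4]
    have := dsd_scan_le_of_occ cs 4 ((dsd_occ4 cs).mpr h4)
    omega
  rw [if_neg h4]
  have n4 : dsdScan cs ≠ 4 := fun e => h4 ((dsd_occ4 cs).mp (by rcases hcases with h | h; omega; exact e ▸ h))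
  by_cases h5 : dsdB5 cs = true
  · rw [if_pos h5]
    have := dsd_scan_le_of_occ cs 5 ((dsd_occ5 cs).mpr h5)
    omega
  rw [if_neg h5]
  have n5 : dsdScan cs ≠ 5 := fun e => h5 ((dsd_occ5 cs).mp (by rcases hcases with h | h; omega; exact e ▸ h))
  omega

-- a token containing tok as an infix can only occur where tok occurs
theorem dsd_isIn_mono (t u cs : List Char) (h : t <:+: u)
    (hu : PySem.Chars.isIn u cs = true) : PySem.Chars.isIn t cs = true := by
  rw [PySem.Chars.isIn_iff_infix] at hu ⊢
  exact h.trans hu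

-- A's redundant tokens (each containing a kept token) absorbed into B's grouped tests
theorem dsd_e1 (cs : List Char) :
    (PySem.Chars.isIn "earnings_presentation".toList cs || (PySem.Chars.isIn "presentation".toList cs
      || (PySem.Chars.isIn "slides_text".toList cs || (PySem.Chars.isIn "slides_ocr".toList cs
      || PySem.Chars.isIn "slides".toList cs)))) = dsdB1 cs := by
  have m_ep := dsd_isIn_mono "presentation".toList "earnings_presentation".toList cs (by decide)
  have m_st := dsd_isIn_mono "slides".toList "slides_text".toList cs (by decide)
  have m_so := dsd_isIn_mono "slides".toList "slides_ocr".toList cs (by decide)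
  rw [Bool.eq_iff_iff]
  simp only [dsdB1, Bool.or_eq_true]
  constructor
  · rintro (h | h | h | h | h)
    · exact .inl (m_ep h)
    · exact .inl h
    · exact .inr (m_st h)
    · exact .inr (m_so h)
    · exact .inr h
  · rintro (h | h)
    · exact .inr (.inl h)
    · exact .inr (.inr (.inr (.inr h)))

theorem dsd_e2 (cs : List Char) :
    (PySem.Chars.isIn "earnings_release".toList cs || (PySem.Chars.isIn "press_release".toList cs
      || (PySem.Chars.isIn "press release".toList cs || PySem.Chars.isIn "release".toList cs))) = dsdB2 cs := by
  have m_er := dsd_isIn_mono "release".toList "earnings_release".toList cs (by decide)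
  have m_pr := dsd_isIn_mono "release".toList "press_release".toList cs (by decide)
  have m_ps := dsd_isIn_mono "release".toList "press release".toList cs (by decide)
  rw [Bool.eq_iff_iff]
  simp only [dsdB2, Bool.or_eq_true]
  constructor
  · rintro (h | h | h | h)
    · exact m_er h
    · exact m_pr h
    · exact m_ps h
    · exact h
  · exact fun h => .inr (.inr (.inr h))

theorem dsd_chainA_eq (low fb : String) :
    dsdChainA low fb = (if dsdB0 low.toList then "internal_metric" else if dsdB1 low.toList then "presentation"
      else if dsdB2 low.toList then "earnings_release" else if dsdB3 low.toList then "transcript"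
      else if dsdB4 low.toList then "10-Q" else if dsdB5 low.toList then "10-K" else fb) := by
  unfold dsdChainA
  simp only [List.any_cons, List.any_nil, Bool.or_false, PySem.Str.isIn_eq]
  rw [dsd_e1, dsd_e2]
  rfl

theorem dsd_main (low fb : String) :
    dsdChainA low fb
      = (if dsdScan low.toList < 6 then dsdLabels.getD (dsdScan low.toList) ""
         else fb) := by
  rw [dsd_chainA_eq, dsd_scan_eq_idx]
  by_cases h0 : dsdB0 low.toList = true <;>
  by_cases h1 : dsdB1 low.toList = true <;>
  by_cases h2 : dsdB2 low.toList = true <;>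
  by_cases h3 : dsdB3 low.toList = true <;>
  by_cases h4 : dsdB4 low.toList = true <;>
  by_cases h5 : dsdB5 low.toList = true <;>
  simp [h0, h1, h2, h3, h4, h5, dsdLabels]

-- ===== VERDICT (by name: the statement is the Claim_ definition above) =====
theorem driver_source_display_spec : Claim_equal_driver_source_display := by
  intro st sd _
  show driver_source_display st sd = driver_source_display_alt st sd
  unfold driver_source_display driver_source_display_alt
  exact dsd_main _ _
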